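-- pv_equiv track=rewrite | github.com/Toluar/Advent_of_Code | 2015/Day11-1.py | Test_Double
-- ===== SOURCE A (Python) =====
-- def Test_Double(s):
--     R = False
--     Count = 0
--     for i in range(len(s)-2):
--         if (s[i+1] == s[i+2]) and (s[i] != s[i+1]) :
--             Count += 1
--     if Count >1 :
--         R = True
--     return R
--
-- R = False
-- ===== SOURCE B (Python) =====
-- def Test_Double(s):
--     # run-length scan: count maximal runs of length >= 2 that start after the first run
--     count = 0
--     run = 1
--     after_first = False
--     for j in range(1, len(s)):
--         if s[j] == s[j - 1]:
--             run += 1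
--         else:
--             if after_first and run >= 2:
--                 count += 1
--             after_first = True
--             run = 1
--     if after_first and run >= 2:
--         count += 1
--     return count > 1
-- ===== Notes on version B (the rewrite author's own statement) =====
-- stated objective: alternative
-- what changed: Replaced the index-based sliding triple scan (s[i], s[i+1], s[i+2] over range(len(s)-2)) by a single run-length scan over consecutive characters that counts maximal runs of length >= 2 starting after the first run.
import Mathlib
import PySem

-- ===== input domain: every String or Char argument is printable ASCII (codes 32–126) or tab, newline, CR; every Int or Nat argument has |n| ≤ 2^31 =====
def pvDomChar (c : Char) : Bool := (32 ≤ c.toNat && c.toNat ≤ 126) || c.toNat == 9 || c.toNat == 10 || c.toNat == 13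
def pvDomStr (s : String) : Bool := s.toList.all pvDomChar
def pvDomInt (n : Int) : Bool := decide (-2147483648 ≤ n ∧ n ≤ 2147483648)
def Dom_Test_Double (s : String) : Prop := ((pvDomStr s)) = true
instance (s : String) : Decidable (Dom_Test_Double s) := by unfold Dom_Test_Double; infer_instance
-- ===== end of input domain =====

-- B replaces A's sliding index-triple scan by a single run-length scan over consecutive characters (alternative decomposition, same cost).


-- ===== PORT A =====
def Test_Double (s : String) : Bool :=
  let l := s.toList
  let R := false
  let count := (PySem.List.pyRange 0 ((l.length : Int) - 2) 1).foldl
    (fun c i =>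
      if PySem.List.pyGetD l (i + 1) ' ' = PySem.List.pyGetD l (i + 2) ' ' ∧
         PySem.List.pyGetD l i ' ' ≠ PySem.List.pyGetD l (i + 1) ' ' then c + 1 else c) 0
  let R := if count > 1 then true else R
  R

-- ===== PORT B =====
def pvAltLoop : Char → List Char → Nat → Bool → Nat → Nat
  | _, [], run, sf, count => if sf ∧ 2 ≤ run then count + 1 else count
  | prev, c :: rest, run, sf, count =>
    if c = prev then pvAltLoop c rest (run + 1) sf count
    else pvAltLoop c rest 1 true (if sf ∧ 2 ≤ run then count + 1 else count)

def Test_Double_alt (s : String) : Bool :=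
  match s.toList with
  | [] => decide ((0 : Nat) > 1)
  | c :: rest => decide (pvAltLoop c rest 1 false 0 > 1)

-- ===== PRECONDITION & SPEC =====
def Spec_Test_Double (s : String) (out : Bool) : Prop := out = Test_Double_alt s
instance (s : String) (out : Bool) : Decidable (Spec_Test_Double s out) := by unfold Spec_Test_Double; infer_instance

-- ===== CLAIM (what is proved, stated in full; the proofs are below) =====
def Claim_equal_Test_Double : Prop := ∀ (s : String), Dom_Test_Double s → Spec_Test_Double s (Test_Double s)

-- ===== LEMMAS AND PROOFS =====

/-- Count of positions j ≥ 1 where a run of length ≥ 2 starts: triple-wise recursion. -/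
def pvTCount : List Char → Nat
  | a :: b :: c :: rest => (if b = c ∧ a ≠ b then 1 else 0) + pvTCount (b :: c :: rest)
  | _ => 0

/-- "the current run will end with length ≥ 2": already run ≥ 2, or the next char continues it. -/
def pvExtra (prev : Char) (t : List Char) (run : Nat) (sf : Bool) : Nat :=
  if sf ∧ (2 ≤ run ∨ t.head? = some prev) then 1 else 0

theorem pvAltLoop_eq (t : List Char) : ∀ (prev : Char) (run : Nat) (sf : Bool) (count : Nat),
    1 ≤ run → pvAltLoop prev t run sf count = count + pvTCount (prev :: t) + pvExtra prev t run sf := by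
  induction t with
  | nil =>
    intro prev run sf count _
    simp only [pvAltLoop, pvTCount, pvExtra, List.head?]
    split_ifs <;> simp_all <;> omega
  | cons c rest ih =>
    intro prev run sf count hrun
    by_cases hc : c = prev
    · subst hc
      simp only [pvAltLoop, if_pos rfl]
      rw [ih c (run + 1) sf count (by omega)]
      have ht : pvTCount (c :: c :: rest) = pvTCount (c :: rest) := by
        cases rest with
        | nil => simp [pvTCount]
        | cons d r => simp [pvTCount]
      rw [ht]
      clear ih
      simp only [pvExtra, List.head?]
      split_ifs <;> simp_all <;> omega
    · simp only [pvAltLoop, if_neg hc]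
      rw [ih c 1 true _ (by omega)]
      clear ih
      cases rest with
      | nil =>
        simp only [pvTCount, pvExtra, List.head?]
        split_ifs <;> simp_all <;> omega
      | cons d r =>
        simp only [pvTCount, pvExtra, List.head?, Option.some.injEq]
        by_cases hd : d = c
        · rw [if_pos (⟨hd.symm, fun h => hc h.symm⟩ : c = d ∧ prev ≠ c)]
          rw [if_pos (⟨trivial, Or.inr hd⟩ : True ∧ ((2:ℕ) ≤ 1 ∨ d = c))]
          by_cases hsf : sf = true ∧ 2 ≤ run
          · rw [if_pos hsf, if_pos (⟨hsf.1, Or.inl hsf.2⟩ : sf = true ∧ (2 ≤ run ∨ c = prev))]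
            omega
          · rw [if_neg hsf, if_neg (fun h => hsf ⟨h.1, h.2.resolve_right hc⟩ : ¬ (sf = true ∧ (2 ≤ run ∨ c = prev)))]
            omega
        · rw [if_neg (fun h => hd h.1.symm : ¬ (c = d ∧ prev ≠ c))]
          rw [if_neg (fun h => hd (h.2.resolve_left (by omega)) : ¬ (True ∧ ((2:ℕ) ≤ 1 ∨ d = c)))]
          by_cases hsf : sf = true ∧ 2 ≤ run
          · rw [if_pos hsf, if_pos (⟨hsf.1, Or.inl hsf.2⟩ : sf = true ∧ (2 ≤ run ∨ c = prev))]
            omega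
          · rw [if_neg hsf, if_neg (fun h => hsf ⟨h.1, h.2.resolve_right hc⟩ : ¬ (sf = true ∧ (2 ≤ run ∨ c = prev)))]
            omega

/-- B's result in terms of pvTCount. -/
theorem alt_eq_tcount (s : String) : Test_Double_alt s = decide (pvTCount s.toList > 1) := by
  unfold Test_Double_alt
  cases h : s.toList with
  | nil => simp [pvTCount]
  | cons c rest =>
    simp only
    rw [pvAltLoop_eq rest c 1 false 0 (by omega)]
    simp [pvExtra]

/-- counting foldl = acc + countP. -/
theorem foldl_countP (p : Int → Prop) [DecidablePred p] (xs : List Int) : ∀ acc : Nat,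
    xs.foldl (fun c i => if p i then c + 1 else c) acc = acc + xs.countP (fun i => decide (p i)) := by
  induction xs with
  | nil => simp
  | cons x t ih =>
    intro acc
    simp only [List.foldl, List.countP_cons]
    by_cases h : p x <;> simp [h, ih] <;> omega

/-- A's count as a countP over Nat indices equals pvTCount. -/
theorem range_countP_eq_tcount (l : List Char) :
    (List.range (l.length - 2)).countP
      (fun k => decide (l.getD (k + 1) ' ' = l.getD (k + 2) ' ' ∧ l.getD k ' ' ≠ l.getD (k + 1) ' '))
      = pvTCount l := by
  match l with
  | [] => simp [pvTCount]
  | [a] => simp [pvTCount]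
  | [a, b] => simp [pvTCount]
  | a :: b :: c :: rest =>
    have hlen : (a :: b :: c :: rest).length - 2 = (b :: c :: rest).length - 2 + 1 := by
      simp
    rw [hlen, List.range_succ_eq_map, List.countP_cons, List.countP_map]
    have hrec := range_countP_eq_tcount (b :: c :: rest)
    have hsh : (List.range ((b :: c :: rest).length - 2)).countP
        ((fun k => decide ((a :: b :: c :: rest).getD (k + 1) ' ' = (a :: b :: c :: rest).getD (k + 2) ' ' ∧
            (a :: b :: c :: rest).getD k ' ' ≠ (a :: b :: c :: rest).getD (k + 1) ' ')) ∘ (· + 1))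
        = pvTCount (b :: c :: rest) := by
      rw [← hrec]
      apply List.countP_congr
      intro k _
      simp [Function.comp, List.getD]
    rw [hsh]
    simp only [pvTCount]
    by_cases h : b = c ∧ a ≠ b <;> simp [h, List.getD] <;> omega
termination_by l.length

/-- A's result in terms of pvTCount. -/
theorem a_eq_tcount (s : String) : Test_Double s = decide (pvTCount s.toList > 1) := by
  unfold Test_Double
  simp only [PySem.List.pyRange_one]
  rw [foldl_countP (fun i =>
      PySem.List.pyGetD s.toList (i + 1) ' ' = PySem.List.pyGetD s.toList (i + 2) ' ' ∧
        PySem.List.pyGetD s.toList i ' ' ≠ PySem.List.pyGetD s.toList (i + 1) ' ')]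
  rw [List.countP_map]
  have hn : ((s.toList.length : Int) - 2 - 0).toNat = s.toList.length - 2 := by omega
  rw [hn]
  have hcong : (List.range (s.toList.length - 2)).countP
      ((fun i => decide (PySem.List.pyGetD s.toList (i + 1) ' ' = PySem.List.pyGetD s.toList (i + 2) ' ' ∧
        PySem.List.pyGetD s.toList i ' ' ≠ PySem.List.pyGetD s.toList (i + 1) ' ')) ∘ (fun k : Nat => (0 : Int) + (k : Int)))
      = (List.range (s.toList.length - 2)).countP
      (fun k => decide (s.toList.getD (k + 1) ' ' = s.toList.getD (k + 2) ' ' ∧ s.toList.getD k ' ' ≠ s.toList.getD (k + 1) ' ')) := by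
    apply List.countP_congr
    intro k _
    simp only [Function.comp, zero_add]
    norm_cast
    simp only [PySem.List.pyGetD_natCast]
  rw [hcong, range_countP_eq_tcount]
  simp

-- ===== VERDICT (by name: the statement is the Claim_ definition above) =====
theorem Test_Double_spec : Claim_equal_Test_Double := by
  intro s _
  unfold Spec_Test_Double
  rw [alt_eq_tcount, a_eq_tcount]
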